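-- pv_equiv track=rewrite | github.com/ogty/code-snippet-generator | models/diff_snippet.py | swap
-- ===== SOURCE A (Python) =====
-- from typing import List, Dict
--
-- def swap(array: List[int | None]) -> List[int | None]:
--     is_none_start = array[0] is None
--     count = 0
--     result = []
--     if is_none_start:
--         for item in array:
--             if item is not None:
--                 result.insert(count, item)
--                 count += 1
--                 continue
--             result.append(None)
--         return result
--     for item in array:
--         if item is None:
--             result.insert(count, None)
--             count += 1
--             continue
--         result.append(item)
--     return result
-- ===== SOURCE B (Python) =====
-- from typing import List
--
--
-- def swap(array: List[int | None]) -> List[int | None]: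
--     first = array[0] is None
--     return sorted(array, key=lambda x: (x is None) == first)
-- ===== Notes on version B (the rewrite author's own statement) =====
-- stated objective: faster
-- what changed: Replaced the two symmetric scan-and-insert partition loops (each front insertion shifts the suffix) by a single stable sort keyed on whether an element's None-ness matches the first element's, relying on sort stability for relative order.
import Mathlib
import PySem

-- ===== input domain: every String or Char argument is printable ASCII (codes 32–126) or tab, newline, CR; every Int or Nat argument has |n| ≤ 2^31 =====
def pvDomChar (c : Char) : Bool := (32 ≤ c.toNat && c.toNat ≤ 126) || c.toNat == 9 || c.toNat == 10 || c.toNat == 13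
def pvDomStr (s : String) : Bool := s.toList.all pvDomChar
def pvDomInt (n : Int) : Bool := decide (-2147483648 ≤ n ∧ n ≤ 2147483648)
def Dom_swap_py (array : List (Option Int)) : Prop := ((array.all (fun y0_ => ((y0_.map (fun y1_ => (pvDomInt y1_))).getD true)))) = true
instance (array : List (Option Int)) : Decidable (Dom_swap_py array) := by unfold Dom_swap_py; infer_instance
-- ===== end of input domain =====

-- B replaces A's scan-and-insert partition loops by a single stable sort on a boolean key (measured faster; A's front insertions are linear each).

-- ===== PORT A =====
def swap_py (array : List (Option Int)) : List (Option Int) :=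
  -- is_none_start: whether the first element is None (Python indexes it, raising IndexError on an empty list; excluded by Pre_)
  let isNoneStart : Bool := PySem.List.pyGetD array 0 none == none
  if isNoneStart then
    -- for item in array: if item is not None: result.insert(count, item); count += 1 else result.append(None)
    (array.foldl
      (fun (s : Int × List (Option Int)) item =>
        if !(item == none) then (s.1 + 1, PySem.List.insert s.2 s.1 item)
        else (s.1, s.2 ++ [none]))
      (0, [])).2
  else
    -- for item in array: if item is None: result.insert(count, None); count += 1 else result.append(item)
    (array.foldl
      (fun (s : Int × List (Option Int)) item =>
        if item == none then (s.1 + 1, PySem.List.insert s.2 s.1 none)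
        else (s.1, s.2 ++ [item]))
      (0, [])).2

-- ===== PORT B =====
def swap_py_alt (array : List (Option Int)) : List (Option Int) :=
  -- first: whether the first element is None; then sorted(array, key=lambda x: (x is None) == first)
  let first : Bool := PySem.List.pyGetD array 0 none == none
  PySem.List.sorted array (fun x => (x == none) == first) false

-- ===== PRECONDITION & SPEC =====
-- A (and B) index the first element: both raise IndexError on the empty list, excluded here.
def Pre_swap_py (array : List (Option Int)) : Prop := array ≠ []
instance (array : List (Option Int)) : Decidable (Pre_swap_py array) := by unfold Pre_swap_py; infer_instance
def pvWitness_swap_py : List (Option Int) := [some 1, none, some 2]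
def Spec_swap_py (array : List (Option Int)) (out : List (Option Int)) : Prop := out = swap_py_alt array
instance (array : List (Option Int)) (out : List (Option Int)) : Decidable (Spec_swap_py array out) := by unfold Spec_swap_py; infer_instance

-- ===== CLAIM (what is proved, stated in full; the proofs are below) =====
def Claim_equal_swap_py : Prop := ∀ (array : List (Option Int)), Dom_swap_py array → Pre_swap_py array → Spec_swap_py array (swap_py array)

-- ===== LEMMAS AND PROOFS =====

-- Inserting at position F.length into F ++ T puts the element between F and T.
lemma insert_mid (F T : List (Option Int)) (v : Option Int) :
    PySem.List.insert (F ++ T) (F.length : Int) v = F ++ v :: T := by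
  rw [PySem.List.insert_natCast _ _ _ (by simp)]
  simp

-- A's loop (branch with predicate P deciding "goes to the front"), generic invariant.
lemma loopA (P : Option Int → Bool) (g : Option Int → Option Int)
    (hg : ∀ x, P x = false → g x = x) :
    ∀ (l F T : List (Option Int)),
      l.foldl
        (fun (s : Int × List (Option Int)) item =>
          if P item then (s.1 + 1, PySem.List.insert s.2 s.1 item)
          else (s.1, s.2 ++ [g item]))
        ((F.length : Int), F ++ T)
      = (((F ++ l.filter P).length : Int),
         (F ++ l.filter P) ++ (T ++ l.filter (fun x => !P x))) := by
  intro l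
  induction l with
  | nil => intro F T; simp
  | cons x xs ih =>
    intro F T
    simp only [List.foldl_cons]
    by_cases hx : P x = true
    · rw [if_pos hx, insert_mid]
      have h2 := ih (F ++ [x]) T
      simp only [List.append_assoc, List.singleton_append, List.length_append,
        List.length_cons, List.length_nil, Nat.zero_add, Nat.cast_add, Nat.cast_one] at h2
      rw [h2]
      simp [hx]
    · rw [if_neg (by simp [hx])]
      have hgx := hg x (by simpa using hx)
      have h2 := ih F (T ++ [g x])
      rw [List.append_assoc] at h2 ⊢
      rw [h2, hgx]
      simp [hx]

-- insertBy with a boolean key: a false-key element lands between the falses and the trues…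
lemma insertBy_partition (key : Option Int → Bool) (x : Option Int) (hx : key x = false) :
    ∀ (F T : List (Option Int)), (∀ y ∈ F, key y = false) → (∀ y ∈ T, key y = true) →
      PySem.List.insertBy (fun a b => decide (key a < key b)) x (F ++ T) = F ++ x :: T := by
  intro F
  induction F with
  | nil =>
    intro T _ hT
    cases T with
    | nil => simp [PySem.List.insertBy]
    | cons y ys =>
      have : key y = true := hT y (by simp)
      simp [PySem.List.insertBy, hx, this]
  | cons f fs ih =>
    intro T hF hT
    have hf : key f = false := hF f (by simp)
    simp only [List.cons_append, PySem.List.insertBy, hx, hf]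
    rw [if_neg (by simp)]
    rw [ih T (fun y hy => hF y (by simp [hy])) hT]

-- …and a true-key element is appended at the very end.
lemma insertBy_append (key : Option Int → Bool) (x : Option Int) (hx : key x = true) :
    ∀ (L : List (Option Int)),
      PySem.List.insertBy (fun a b => decide (key a < key b)) x L = L ++ [x] := by
  intro L
  apply PySem.List.insertBy_of_forall_not_before
  intro y _
  simp [hx]

-- The insertion-sort fold with a boolean key is the stable partition.
lemma sortFold (key : Option Int → Bool) :
    ∀ (l F T : List (Option Int)), (∀ y ∈ F, key y = false) → (∀ y ∈ T, key y = true) →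
      l.foldl (fun acc x => PySem.List.insertBy (fun a b => decide (key a < key b)) x acc) (F ++ T)
      = (F ++ l.filter (fun x => !key x)) ++ (T ++ l.filter key) := by
  intro l
  induction l with
  | nil => intro F T _ _; simp
  | cons x xs ih =>
    intro F T hF hT
    simp only [List.foldl_cons]
    by_cases hx : key x = true
    · rw [insertBy_append key x hx, List.append_assoc]
      have h2 := ih F (T ++ [x]) hF (by intro y hy; rcases List.mem_append.mp hy with h | h
                                        · exact hT y h
                                        · simp at h; subst h; exact hx)
      rw [h2]
      simp [hx]
    · have hx' : key x = false := by simpa using hx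
      rw [insertBy_partition key x hx' F T hF hT]
      have h2 := ih (F ++ [x]) T (by intro y hy; rcases List.mem_append.mp hy with h | h
                                     · exact hF y h
                                     · simp at h; subst h; exact hx') hT
      rw [show F ++ x :: T = (F ++ [x]) ++ T by simp]
      rw [h2]
      simp [hx']

lemma sorted_bool_key (key : Option Int → Bool) (xs : List (Option Int)) :
    PySem.List.sorted xs key false = xs.filter (fun x => !key x) ++ xs.filter key := by
  rw [PySem.List.sorted_eq_foldl_insertBy]
  have := sortFold key xs [] [] (by simp) (by simp)
  simpa using this

-- ===== VERDICT (by name: the statement is the Claim_ definition above) =====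
theorem swap_py_spec : Claim_equal_swap_py := by
  intro array _ _
  unfold Spec_swap_py swap_py swap_py_alt
  cases hb : (PySem.List.pyGetD array 0 none == none) with
  | true =>
    simp only [if_true]
    rw [sorted_bool_key]
    have hA := loopA (fun item => !(item == none)) (fun _ => none)
      (by intro x hx; cases x
          · rfl
          · simp at hx) array [] []
    refine (congrArg Prod.snd hA).trans ?_
    simp only [List.nil_append]
    congr 1
    · exact List.filter_congr (fun x _ => by cases x <;> rfl)
    · exact List.filter_congr (fun x _ => by cases x <;> rfl)
  | false =>
    simp only [Bool.false_eq_true, if_false]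
    rw [sorted_bool_key]
    have hfun : (fun (s : Int × List (Option Int)) (item : Option Int) =>
          if item == none then (s.1 + 1, PySem.List.insert s.2 s.1 none) else (s.1, s.2 ++ [item]))
        = (fun (s : Int × List (Option Int)) (item : Option Int) =>
          if item == none then (s.1 + 1, PySem.List.insert s.2 s.1 item) else (s.1, s.2 ++ [item])) := by
      funext s item; cases item <;> rfl
    rw [hfun]
    have hA := loopA (fun item => item == none) (fun x => x) (fun _ _ => rfl) array [] []
    refine (congrArg Prod.snd hA).trans ?_
    simp only [List.nil_append]
    congr 1
    · exact List.filter_congr (fun x _ => by cases x <;> rfl)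
    · exact List.filter_congr (fun x _ => by cases x <;> rfl)
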